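-- pv_equiv track=rewrite | github.com/envomp/2018-Introduction-to-Programming | ex03_idcode/idcode.py | get_birth_place
-- ===== SOURCE A (Python) =====
-- def is_valid_birth_number(birth_number: int) -> bool:
--     """
--     Check if given value is correct for birth number in ID code.
--
--     :param birth_number: int
--     :return: boolean
--     """
--     return True if 0 < birth_number <= 999 else False
--
-- def get_birth_place(birth_number: int) -> str:
--     """
--     Find the place where the person was born.
--
--     Possible locations are following: Kuressaare, Tartu, Tallinn, Kohtla-Järve, Narva, Pärnu,
--     Paide, Rakvere, Valga, Viljandi, Võru and undefined. Lastly if the number is incorrect the function must return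
--     the following 'Wrong input!'
--     :param birth_number: int
--     :return: str
--     """
--     birth_place = {
--         range(1, 11): "Kuressaare",
--         range(11, 21): "Tartu",
--         range(21, 221): "Tallinn",
--         range(221, 271): "Kohtla-Järve",
--         range(271, 371): "Tartu",
--         range(371, 421): "Narva",
--         range(421, 471): "Pärnu",
--         range(471, 491): "Tallinn",
--         range(491, 521): "Paide",
--         range(521, 571): "Rakvere",
--         range(571, 601): "Valga",
--         range(601, 651): "Viljandi",
--         range(651, 711): "Võru",
--         range(711, 1000): "undefined"
--     }
--
--     if not is_valid_birth_number(birth_number):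
--         return ("Wrong input!")
--
--     for number, city in birth_place.items():
--         if birth_number in number:
--             return city
-- ===== SOURCE B (Python) =====
-- import bisect
--
-- _BOUNDS = [11, 21, 221, 271, 371, 421, 471, 491, 521, 571, 601, 651, 711, 1000]
-- _CITIES = ["Kuressaare", "Tartu", "Tallinn", "Kohtla-Järve", "Tartu", "Narva",
--            "Pärnu", "Tallinn", "Paide", "Rakvere", "Valga", "Viljandi", "Võru",
--            "undefined"]
--
--
-- def get_birth_place(birth_number: int) -> str:
--     if not 0 < birth_number <= 999:
--         return "Wrong input!"
--     return _CITIES[bisect.bisect_right(_BOUNDS, birth_number)]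
-- ===== Notes on version B (the rewrite author's own statement) =====
-- stated objective: idiomatic
-- what changed: Replaces the dict of range objects scanned linearly for membership with two parallel constant lists (upper boundaries and cities) indexed via bisect.bisect_right, i.e. a binary search over cutoffs.
import Mathlib
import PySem

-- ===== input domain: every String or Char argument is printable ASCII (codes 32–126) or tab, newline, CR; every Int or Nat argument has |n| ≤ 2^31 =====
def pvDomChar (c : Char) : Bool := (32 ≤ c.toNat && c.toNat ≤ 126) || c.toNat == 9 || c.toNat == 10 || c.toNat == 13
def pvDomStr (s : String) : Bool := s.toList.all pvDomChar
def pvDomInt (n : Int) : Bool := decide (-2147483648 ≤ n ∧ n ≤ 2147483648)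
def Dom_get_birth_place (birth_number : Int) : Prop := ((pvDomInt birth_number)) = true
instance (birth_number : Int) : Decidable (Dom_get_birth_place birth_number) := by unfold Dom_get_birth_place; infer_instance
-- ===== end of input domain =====

-- B replaces the linear scan over range objects with a binary search (bisect_right) over sorted upper boundaries; idiomatic, no speed claim.


-- ===== PORT A =====
def pyRangeMem (n lo hi : Int) : Bool := decide (lo ≤ n ∧ n < hi)

-- dict keyed by range objects → association list ((lo, hi), city); for-loop first match
def lookupCity (n : Int) : List ((Int × Int) × String) → String
  | [] => ""   -- unreachable: Python falls off the loop only for invalid numbers, filtered before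
  | ((lo, hi), city) :: rest => if pyRangeMem n lo hi then city else lookupCity n rest

def birthPlaceTable : List ((Int × Int) × String) :=
  [((1, 11), "Kuressaare"), ((11, 21), "Tartu"), ((21, 221), "Tallinn"),
   ((221, 271), "Kohtla-Järve"), ((271, 371), "Tartu"), ((371, 421), "Narva"),
   ((421, 471), "Pärnu"), ((471, 491), "Tallinn"), ((491, 521), "Paide"),
   ((521, 571), "Rakvere"), ((571, 601), "Valga"), ((601, 651), "Viljandi"),
   ((651, 711), "Võru"), ((711, 1000), "undefined")]

def is_valid_birth_number (birth_number : Int) : Bool :=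
  if 0 < birth_number ∧ birth_number ≤ 999 then true else false

def get_birth_place (birth_number : Int) : String :=
  if ¬ (is_valid_birth_number birth_number = true) then "Wrong input!"
  else lookupCity birth_number birthPlaceTable

-- ===== PORT B =====
def pvBounds : List Int := [11, 21, 221, 271, 371, 421, 471, 491, 521, 571, 601, 651, 711, 1000]
def pvCities : List String :=
  ["Kuressaare", "Tartu", "Tallinn", "Kohtla-Järve", "Tartu", "Narva",
   "Pärnu", "Tallinn", "Paide", "Rakvere", "Valga", "Viljandi", "Võru", "undefined"]

-- bisect.bisect_right, transliterated (lo/hi binary search); a[mid] is always in range here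
-- the while loop, as fuel-based structural recursion (fuel = hi - lo bounds the iterations)
def bisectGo (a : List Int) (x : Int) : Nat → Nat → Nat → Nat
  | 0, lo, _ => lo
  | fuel + 1, lo, hi =>
    if lo < hi then
      let mid := (lo + hi) / 2
      if x < (PySem.List.pyGet? a (mid : Int)).getD 0 then bisectGo a x fuel lo mid
      else bisectGo a x fuel (mid + 1) hi
    else lo

def bisectRight (a : List Int) (x : Int) : Nat :=
  bisectGo a x a.length 0 a.length

def get_birth_place_alt (birth_number : Int) : String :=
  if ¬ (0 < birth_number ∧ birth_number ≤ 999) then "Wrong input!"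
  else (PySem.List.pyGet? pvCities (bisectRight pvBounds birth_number : Int)).getD ""

-- ===== PRECONDITION & SPEC =====
def Spec_get_birth_place (birth_number : Int) (out : String) : Prop := out = get_birth_place_alt birth_number
instance (birth_number : Int) (out : String) : Decidable (Spec_get_birth_place birth_number out) := by unfold Spec_get_birth_place; infer_instance

-- ===== CLAIM (what is proved, stated in full; the proofs are below) =====
def Claim_equal_get_birth_place : Prop := ∀ (birth_number : Int), Dom_get_birth_place birth_number → Spec_get_birth_place birth_number (get_birth_place birth_number)

-- ===== LEMMAS AND PROOFS =====

-- ===== VERDICT (by name: the statement is the Claim_ definition above) =====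
theorem get_birth_place_spec : Claim_equal_get_birth_place := by
  intro n _
  unfold Spec_get_birth_place
  by_cases h : 0 < n ∧ n ≤ 999
  · obtain ⟨h1, h2⟩ := h
    interval_cases n <;> decide
  · simp only [get_birth_place, get_birth_place_alt, is_valid_birth_number, if_neg h]
    simp [h]
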